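-- pv_equiv track=rewrite | github.com/B1tran2/lacum | harmonic_generator.py | choose_progression
-- ===== SOURCE A (Python) =====
-- from typing import List, Sequence, Tuple
--
-- def choose_progression(style: str, bars: int) -> List[int]:
--     templates = {
--         "barroco": [1, 4, 7, 3, 6, 2, 5, 1],
--         "clasico": [1, 6, 2, 5, 1, 4, 2, 5],
--         "romantico": [1, 3, 6, 4, 2, 5, 1, 6],
--     }
--     template = templates[style]
--     progression = []
--     while len(progression) < bars:
--         progression.extend(template)
--     return progression[:bars]
-- ===== SOURCE B (Python) =====
-- from typing import List
--
-- def choose_progression(style: str, bars: int) -> List[int]: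
--     templates = {
--         "barroco": [1, 4, 7, 3, 6, 2, 5, 1],
--         "clasico": [1, 6, 2, 5, 1, 4, 2, 5],
--         "romantico": [1, 3, 6, 4, 2, 5, 1, 6],
--     }
--     template = templates[style]
--     n = len(template)
--     return [template[i % n] for i in range(bars)]
-- ===== Notes on version B (the rewrite author's own statement) =====
-- stated objective: simpler
-- what changed: Replaces the grow-by-extend-then-truncate buffer loop with a single pass that computes each bar directly by modular indexing into the template.
import Mathlib
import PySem

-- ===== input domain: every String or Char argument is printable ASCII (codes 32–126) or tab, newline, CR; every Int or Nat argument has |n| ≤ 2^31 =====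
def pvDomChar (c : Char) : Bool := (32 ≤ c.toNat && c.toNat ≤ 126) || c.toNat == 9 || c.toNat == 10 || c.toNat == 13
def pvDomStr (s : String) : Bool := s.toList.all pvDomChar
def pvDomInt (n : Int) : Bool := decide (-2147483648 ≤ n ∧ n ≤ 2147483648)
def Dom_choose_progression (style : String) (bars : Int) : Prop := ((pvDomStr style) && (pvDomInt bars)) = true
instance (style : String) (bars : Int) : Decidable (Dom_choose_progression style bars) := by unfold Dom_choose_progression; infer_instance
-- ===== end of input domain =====

-- B replaces A's grow-by-extend-then-truncate buffer with a single modular-index pass (objective: simpler).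


-- the dict literal both Pythons build
def pvTemplates : PySem.Dict String (List Int) :=
  PySem.Dict.ofList [("barroco", [1, 4, 7, 3, 6, 2, 5, 1]),
                     ("clasico", [1, 6, 2, 5, 1, 4, 2, 5]),
                     ("romantico", [1, 3, 6, 4, 2, 5, 1, 6])]

-- ===== PORT A =====
-- 'while len(progression) < bars: progression.extend(template)'; the 'template ≠ []' conjunct is a
-- totality guard only (Python diverges there; every template in the dict is nonempty, so it never fires).
def pvLoopA (template : List Int) (bars : Int) (prog : List Int) : List Int :=
  if h : template ≠ [] ∧ (prog.length : Int) < bars then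
    pvLoopA template bars (prog ++ template)
  else prog
termination_by (bars - prog.length).toNat
decreasing_by
  have := List.length_pos_of_ne_nil h.1
  simp only [List.length_append]
  omega

def choose_progression (style : String) (bars : Int) : List Int :=
  match PySem.Dict.get? pvTemplates style with
  | none => []   -- KeyError in Python: excluded by Pre_
  | some template => PySem.List.slice (pvLoopA template bars []) none (some bars)

-- ===== PORT B =====
def choose_progression_alt (style : String) (bars : Int) : List Int :=
  match PySem.Dict.get? pvTemplates style with
  | none => []   -- KeyError in Python: excluded by Pre_
  | some template =>
      (PySem.List.pyRange 0 bars 1).map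
        (fun i => PySem.List.pyGetD template (PySem.Int.mod i (template.length : Int)) 0)

-- ===== PRECONDITION & SPEC =====
-- Pre_ excludes exactly the styles not in the dict, where Python A raises KeyError.
def Pre_choose_progression (style : String) (bars : Int) : Prop :=
  style = "barroco" ∨ style = "clasico" ∨ style = "romantico"
instance (style : String) (bars : Int) : Decidable (Pre_choose_progression style bars) := by
  unfold Pre_choose_progression; infer_instance
def pvWitness_choose_progression : String × Int := ("barroco", 4)

def Spec_choose_progression (style : String) (bars : Int) (out : List Int) : Prop := out = choose_progression_alt style bars
instance (style : String) (bars : Int) (out : List Int) : Decidable (Spec_choose_progression style bars out) := by unfold Spec_choose_progression; infer_instance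

-- ===== CLAIM (what is proved, stated in full; the proofs are below) =====
def Claim_equal_choose_progression : Prop := ∀ (style : String) (bars : Int), Dom_choose_progression style bars → Pre_choose_progression style bars → Spec_choose_progression style bars (choose_progression style bars)

-- ===== LEMMAS AND PROOFS =====

-- element i of m concatenated copies of t is t[i % |t|]
theorem pvFlattenReplicateGetD (t : List Int) (m i : Nat) (h : i < m * t.length) :
    (List.replicate m t).flatten.getD i 0 = t.getD (i % t.length) 0 := by
  induction m generalizing i with
  | zero => omega
  | succ m ih =>
    rw [List.replicate_succ, List.flatten_cons]
    by_cases hi : i < t.length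
    · rw [List.getD_append _ _ _ _ hi, Nat.mod_eq_of_lt hi]
    · rw [Nat.not_lt] at hi
      have h' : i - t.length < m * t.length := by
        simp only [Nat.succ_mul] at h; omega
      rw [List.getD_append_right _ _ _ _ hi, ih (i - t.length) h',
        Nat.mod_eq_sub_mod hi]

-- the while-loop appends whole copies of the template until the buffer is long enough
theorem pvLoopA_spec (t : List Int) (ht : t ≠ []) (bars : Int) (prog : List Int) :
    ∃ m : Nat, pvLoopA t bars prog = prog ++ (List.replicate m t).flatten ∧
      bars ≤ ((prog.length + m * t.length : Nat) : Int) := by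
  fun_induction pvLoopA t bars prog with
  | case1 prog h ih =>
    obtain ⟨m, heq, hlen⟩ := ih
    refine ⟨m + 1, ?_, ?_⟩
    · rw [heq, List.replicate_succ, List.flatten_cons, List.append_assoc]
    · simp only [List.length_append] at hlen
      have : (prog.length + (m + 1) * t.length : Nat) = (prog.length + t.length + m * t.length : Nat) := by ring
      omega
  | case2 prog h =>
    refine ⟨0, by simp, ?_⟩
    simp only [not_and, not_lt] at h
    have := h ht
    omega

theorem pvMainEq (t : List Int) (ht : t ≠ []) (bars : Int) :
    PySem.List.slice (pvLoopA t bars []) none (some bars) =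
      (PySem.List.pyRange 0 bars 1).map
        (fun i => PySem.List.pyGetD t (PySem.Int.mod i (t.length : Int)) 0) := by
  by_cases hb : bars ≤ 0
  · rw [PySem.List.pyRange_one_eq_nil hb]
    rw [pvLoopA]
    simp only [List.length_nil, Int.natCast_zero]
    rw [dif_neg (by omega)]
    simp [PySem.List.slice]
  · rw [not_le] at hb
    obtain ⟨m, heq, hlen⟩ := pvLoopA_spec t ht bars []
    simp only [List.nil_append, List.length_nil, Nat.zero_add] at heq hlen
    rw [heq, PySem.List.slice_to _ (le_of_lt hb)]
    have hn : bars = (bars.toNat : Int) := by omega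
    rw [hn, PySem.List.pyRange_zero_natCast]
    have htl := List.length_pos_of_ne_nil ht
    have hle : bars.toNat ≤ m * t.length := by omega
    apply List.ext_getElem
    · simp [List.length_flatten, List.map_replicate, List.sum_replicate, smul_eq_mul]
      omega
    · intro i h1 h2
      simp only [List.getElem_take, List.getElem_map, List.getElem_range]
      have hi : i < m * t.length := by
        simp only [List.length_take] at h1; omega
      have hflat : ∀ hh, ((List.replicate m t).flatten)[i]'hh = (List.replicate m t).flatten.getD i 0 := by
        intro hh; rw [List.getD_eq_getElem]
      rw [hflat, pvFlattenReplicateGetD t m i hi]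
      rw [PySem.Int.mod_natCast, PySem.List.pyGetD_natCast]

-- ===== VERDICT (by name: the statement is the Claim_ definition above) =====
theorem choose_progression_spec : Claim_equal_choose_progression := by
  intro style bars _ hpre
  show choose_progression style bars = choose_progression_alt style bars
  rcases hpre with h | h | h <;> subst h <;>
    · show PySem.List.slice (pvLoopA _ bars []) none (some bars) = _
      exact pvMainEq _ (by decide) bars
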